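-- pv_equiv track=rewrite | github.com/mayureshmali/DGA-Domain-Detection---Smart-URL | First attempt at a model/xgboost_dga_mrm - with extra features.py | consecutive_consonants
-- ===== SOURCE A (Python) =====
-- def consecutive_consonants(string):
--     from itertools import groupby
--     is_vowel = lambda char: char in "aAeEiIoOuU"
--     best = 0
--     listnames = ["".join(g) for v, g in groupby(string, key=is_vowel) if not v]
--     for index in range(len(listnames)):
--         if len(listnames[index]) > best:
--             best = len(listnames[index])
--     return best
-- ===== SOURCE B (Python) =====
-- def consecutive_consonants(string):
--     best = 0
--     current = 0
--     for char in string: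
--         if char in "aAeEiIoOuU":
--             current = 0
--         else:
--             current += 1
--         best = max(best, current)
--     return best
-- ===== Notes on version B (the rewrite author's own statement) =====
-- stated objective: simpler
-- what changed: Replaces the groupby-into-list-of-run-strings phase plus index loop with a single character pass maintaining a current run counter and a running maximum.
import Mathlib
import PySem

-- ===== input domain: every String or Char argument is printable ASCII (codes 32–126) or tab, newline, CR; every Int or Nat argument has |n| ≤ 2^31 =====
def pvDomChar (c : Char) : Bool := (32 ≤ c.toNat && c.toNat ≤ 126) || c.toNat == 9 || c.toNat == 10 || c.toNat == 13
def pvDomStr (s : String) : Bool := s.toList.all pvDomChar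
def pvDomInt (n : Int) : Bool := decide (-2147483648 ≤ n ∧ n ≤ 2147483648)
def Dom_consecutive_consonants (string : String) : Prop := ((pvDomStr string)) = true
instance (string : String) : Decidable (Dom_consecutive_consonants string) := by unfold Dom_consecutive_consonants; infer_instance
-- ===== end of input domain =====

-- B replaces A's groupby-into-run-strings phase + index loop by one counter-maintaining pass; same exact result.

-- ===== PORT A =====
-- is_vowel = lambda char: char in "aAeEiIoOuU"
def pvIsVowel (c : Char) : Bool := "aAeEiIoOuU".toList.contains c

-- itertools.groupby over chars with key pvIsVowel: list of (key, run) in order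
def pvGroupRuns (l : List Char) : List (Bool × List Char) :=
  match l with
  | [] => []
  | c :: cs =>
    let k := pvIsVowel c
    (k, c :: cs.takeWhile (fun d => pvIsVowel d == k)) ::
      pvGroupRuns (cs.dropWhile (fun d => pvIsVowel d == k))
termination_by l.length
decreasing_by
  simpa using Nat.lt_succ_of_le (List.length_dropWhile_le _ _)

def consecutive_consonants (string : String) : Int :=
  -- listnames = ["".join(g) for v, g in groupby(string, key=is_vowel) if not v]
  -- each "".join(g) is kept as its list of chars; len(join g) = g.length (exact)
  let listnames : List (List Char) :=
    ((pvGroupRuns string.toList).filter (fun g => !g.1)).map (fun g => g.2)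
  listnames.foldl (fun best name =>
    if (name.length : Int) > best then (name.length : Int) else best) 0

-- ===== PORT B =====
-- same membership test as Source B's `char in "aAeEiIoOuU"`
def pvIsVowelB (c : Char) : Bool := "aAeEiIoOuU".toList.contains c

def consecutive_consonants_alt (string : String) : Int :=
  (string.toList.foldl (fun (st : Int × Int) c =>
      let current := if pvIsVowelB c then 0 else st.2 + 1
      (max st.1 current, current)) (0, 0)).1

-- ===== PRECONDITION & SPEC =====
def Spec_consecutive_consonants (string : String) (out : Int) : Prop := out = consecutive_consonants_alt string
instance (string : String) (out : Int) : Decidable (Spec_consecutive_consonants string out) := by unfold Spec_consecutive_consonants; infer_instance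

-- ===== CLAIM (what is proved, stated in full; the proofs are below) =====
def Claim_equal_consecutive_consonants : Prop := ∀ (string : String), Dom_consecutive_consonants string → Spec_consecutive_consonants string (consecutive_consonants string)

-- ===== LEMMAS AND PROOFS =====

-- the counter trajectory maximum: pvS cur l = max of the counter values taken after each step
def pvS (cur : Int) (l : List Char) : Int :=
  match l with
  | [] => 0
  | c :: cs =>
    let cur' := if pvIsVowelB c then 0 else cur + 1
    max cur' (pvS cur' cs)

def pvMaxl (ns : List Int) : Int := ns.foldr max 0

def pvLens (l : List Char) : List Int :=
  ((pvGroupRuns l).filter (fun g => !g.1)).map (fun g => (g.2.length : Int))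

theorem pvVowel_eq : pvIsVowelB = pvIsVowel := rfl

theorem pvS_nonneg (l : List Char) (cur : Int) : 0 ≤ pvS cur l := by
  cases l with
  | nil => simp [pvS]
  | cons c cs =>
    simp only [pvS]
    exact le_trans (pvS_nonneg cs _) (le_max_right _ _)

theorem pvMaxl_nonneg (ns : List Int) : 0 ≤ pvMaxl ns := by
  induction ns with
  | nil => simp [pvMaxl]
  | cons n ns ih => simp only [pvMaxl, List.foldr] at *; exact le_trans ih (le_max_right _ _)

theorem foldB_eq (l : List Char) : ∀ best cur : Int, 0 ≤ best →
    (l.foldl (fun (st : Int × Int) c =>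
      let current := if pvIsVowelB c then 0 else st.2 + 1
      (max st.1 current, current)) (best, cur)).1 = max best (pvS cur l) := by
  induction l with
  | nil => intro best cur h; simp [pvS, max_eq_left h]
  | cons c cs ih =>
    intro best cur h
    simp only [List.foldl, pvS]
    rw [ih (max best (if pvIsVowelB c then 0 else cur + 1)) _ (le_trans h (le_max_left _ _)),
        max_assoc]

theorem foldA_names (ns : List (List Char)) : ∀ b : Int, 0 ≤ b →
    ns.foldl (fun best name =>
      if (name.length : Int) > best then (name.length : Int) else best) b =
    max b (pvMaxl (ns.map (fun g => (g.length : Int)))) := by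
  induction ns with
  | nil => intro b h; simp [pvMaxl, max_eq_left h]
  | cons n ns ih =>
    intro b h
    simp only [List.foldl, List.map, pvMaxl, List.foldr] at *
    rw [ih _ (by omega)]
    have : (if (n.length : Int) > b then (n.length : Int) else b) = max b n.length := by omega
    rw [this, max_assoc]

-- a leading all-vowel block resets nothing new: it contributes nothing
theorem pvS_vowel_run (w : List Char) : ∀ rest, (∀ c ∈ w, pvIsVowelB c = true) →
    pvS 0 (w ++ rest) = pvS 0 rest := by
  induction w with
  | nil => intro rest _; rfl
  | cons v w' ih =>
    intro rest h
    simp only [List.cons_append, pvS, h v (by simp), reduceIte]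
    rw [max_eq_right (pvS_nonneg _ _), ih rest (fun c hc => h c (by simp [hc]))]

-- a leading all-consonant block raises the counter by its length
theorem pvS_cons_run (w : List Char) : ∀ rest (cur : Int), w ≠ [] →
    (∀ c ∈ w, pvIsVowelB c = false) →
    pvS cur (w ++ rest) = max (cur + w.length) (pvS (cur + w.length) rest) := by
  induction w with
  | nil => intro _ _ h _; exact absurd rfl h
  | cons c w' ih =>
    intro rest cur _ h
    simp only [List.cons_append, pvS, h c (by simp), Bool.false_eq_true, reduceIte]
    cases w' with
    | nil => simp
    | cons d t =>
      rw [ih rest (cur + 1) (by simp) (fun x hx => h x (by simp [List.mem_cons] at hx ⊢; tauto))]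
      have hL : (((c :: d :: t).length : Nat) : Int) = (((d :: t).length : Nat) : Int) + 1 := by
        push_cast [List.length_cons]; ring
      have h0 : (0 : Int) ≤ ((d :: t).length : Int) := Int.natCast_nonneg _
      rw [hL, show cur + 1 + (((d :: t).length : Nat) : Int) =
        cur + ((((d :: t).length : Nat) : Int) + 1) from by ring]
      omega

-- pvS ignores its counter when the rest is empty or starts with a vowel
theorem pvS_reset (rest : List Char) (cur : Int)
    (h : rest = [] ∨ ∃ d t, rest = d :: t ∧ pvIsVowelB d = true) :
    pvS cur rest = pvS 0 rest := by
  rcases h with h | ⟨d, t, rfl, hd⟩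
  · subst h; rfl
  · simp [pvS, hd]

theorem dropWhile_shape (p : Char → Bool) (l : List Char) :
    l.dropWhile p = [] ∨ ∃ d t, l.dropWhile p = d :: t ∧ p d = false := by
  induction l with
  | nil => exact Or.inl rfl
  | cons c cs ih =>
    by_cases h : p c
    · simpa [h] using ih
    · exact Or.inr ⟨c, cs, by simp [h], by simpa using h⟩

theorem main_eq : ∀ (n : Nat) (l : List Char), l.length ≤ n → pvS 0 l = pvMaxl (pvLens l) := by
  intro n
  induction n with
  | zero =>
    intro l hl
    rw [List.length_eq_zero_iff.mp (Nat.le_zero.mp hl)]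
    simp [pvS, pvMaxl, pvLens, pvGroupRuns]
  | succ n ih =>
    intro l hl
    cases l with
    | nil => simp [pvS, pvMaxl, pvLens, pvGroupRuns]
    | cons c cs =>
      have hsplit : cs = cs.takeWhile (fun d => pvIsVowel d == pvIsVowel c) ++
          cs.dropWhile (fun d => pvIsVowel d == pvIsVowel c) :=
        (List.takeWhile_append_dropWhile).symm
      have hdp : (cs.dropWhile (fun d => pvIsVowel d == pvIsVowel c)).length ≤ n := by
        have := List.length_dropWhile_le (fun d => pvIsVowel d == pvIsVowel c) cs
        simp at hl; omega
      have htk : ∀ d ∈ cs.takeWhile (fun d => pvIsVowel d == pvIsVowel c),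
          pvIsVowel d = pvIsVowel c := by
        intro d hd
        simpa using List.mem_takeWhile_imp hd
      by_cases hv : pvIsVowel c
      · -- vowel-led group: filtered out on the A side, resets on the B side
        have hA : pvLens (c :: cs) =
            pvLens (cs.dropWhile (fun d => pvIsVowel d == pvIsVowel c)) := by
          simp [pvLens, pvGroupRuns, hv]
        have hB : pvS 0 (c :: cs) =
            pvS 0 (cs.dropWhile (fun d => pvIsVowel d == pvIsVowel c)) := by
          conv_lhs => rw [show c :: cs =
            (c :: cs.takeWhile (fun d => pvIsVowel d == pvIsVowel c)) ++
            cs.dropWhile (fun d => pvIsVowel d == pvIsVowel c) by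
              simp only [List.cons_append]; rw [← hsplit]]
          exact pvS_vowel_run _ _ (by
            intro x hx
            rcases List.mem_cons.mp hx with rfl | hx
            · simpa [pvVowel_eq] using hv
            · simpa [pvVowel_eq] using (htk x hx).trans (by simp [hv]))
        rw [hA, hB]; exact ih _ hdp
      · -- consonant-led group
        have hvB : pvIsVowel c = false := by simpa using hv
        have hA : pvLens (c :: cs) =
            ((cs.takeWhile (fun d => pvIsVowel d == pvIsVowel c)).length + 1 : Int) ::
            pvLens (cs.dropWhile (fun d => pvIsVowel d == pvIsVowel c)) := by
          simp [pvLens, pvGroupRuns, hvB]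
        have hB : pvS 0 (c :: cs) =
            max ((cs.takeWhile (fun d => pvIsVowel d == pvIsVowel c)).length + 1 : Int)
              (pvS 0 (cs.dropWhile (fun d => pvIsVowel d == pvIsVowel c))) := by
          conv_lhs => rw [show c :: cs =
            (c :: cs.takeWhile (fun d => pvIsVowel d == pvIsVowel c)) ++
            cs.dropWhile (fun d => pvIsVowel d == pvIsVowel c) by
              simp only [List.cons_append]; rw [← hsplit]]
          rw [pvS_cons_run _ _ 0 (by simp) (by
            intro x hx
            rcases List.mem_cons.mp hx with rfl | hx
            · simpa [pvVowel_eq] using hvB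
            · simpa [pvVowel_eq] using (htk x hx).trans (by simp [hvB]))]
          rw [pvS_reset _ _ (by
            simpa [pvVowel_eq, hvB] using
              dropWhile_shape (fun d => pvIsVowel d == pvIsVowel c) cs)]
          congr 1
          push_cast [List.length_cons]
          ring
        rw [hA, hB]
        have := ih _ hdp
        simp only [pvMaxl, List.foldr] at *
        rw [this]

-- ===== VERDICT (by name: the statement is the Claim_ definition above) =====
theorem consecutive_consonants_spec : Claim_equal_consecutive_consonants := by
  intro s _
  show consecutive_consonants s = consecutive_consonants_alt s
  unfold consecutive_consonants consecutive_consonants_alt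
  rw [foldB_eq _ 0 0 le_rfl, foldA_names _ 0 le_rfl,
      max_eq_right (pvMaxl_nonneg _), max_eq_right (pvS_nonneg _ _), List.map_map]
  exact (main_eq s.toList.length s.toList le_rfl).symm
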